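-- pv_equiv track=rewrite | github.com/thetrafficgroup/traffic-poc-processor | src/tmc/tmc_processor.py | build_analysis_by_vehicle_class
-- ===== SOURCE A (Python) =====
-- def build_analysis_by_vehicle_class(detected_classes, turn_types_by_id, crossing_timestamps, crossed_lines_by_id):
--     """
--     Build new analysis structure grouped by vehicle class first.
--     Structure: vehicle_class -> origin_direction -> turn_direction -> count
--     """
--     analysis = {}
--
--     # Initialize totals structure
--     totals = {
--         "NORTH": {"straight": 0, "left": 0, "right": 0, "u-turn": 0},
--         "SOUTH": {"straight": 0, "left": 0, "right": 0, "u-turn": 0},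
--         "EAST": {"straight": 0, "left": 0, "right": 0, "u-turn": 0},
--         "WEST": {"straight": 0, "left": 0, "right": 0, "u-turn": 0}
--     }
--
--     # Group vehicles by class
--     vehicles_by_class = {}
--     for obj_id, vehicle_class in detected_classes.items():
--         if vehicle_class not in vehicles_by_class:
--             vehicles_by_class[vehicle_class] = []
--         vehicles_by_class[vehicle_class].append(obj_id)
--
--     # For each vehicle class, analyze movements
--     for vehicle_class, vehicle_ids in vehicles_by_class.items():
--         analysis[vehicle_class] = {
--             "NORTH": {"straight": 0, "left": 0, "right": 0, "u-turn": 0},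
--             "SOUTH": {"straight": 0, "left": 0, "right": 0, "u-turn": 0},
--             "EAST": {"straight": 0, "left": 0, "right": 0, "u-turn": 0},
--             "WEST": {"straight": 0, "left": 0, "right": 0, "u-turn": 0}
--         }
--
--         for vehicle_id in vehicle_ids:
--             # Determine origin direction (first line crossed)
--             if vehicle_id in crossing_timestamps and crossing_timestamps[vehicle_id]:
--                 origin_direction = crossing_timestamps[vehicle_id][0][0]
--
--                 # Determine turn type
--                 if vehicle_id in turn_types_by_id:
--                     turn_type = turn_types_by_id[vehicle_id]
--                 else:
--                     # If no turn detected, assume straight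
--                     turn_type = "straight"
--
--                 # Increment counters
--                 if origin_direction in analysis[vehicle_class] and turn_type in analysis[vehicle_class][origin_direction]:
--                     analysis[vehicle_class][origin_direction][turn_type] += 1
--                     # Also increment totals
--                     totals[origin_direction][turn_type] += 1
--
--     # Add totals to the analysis
--     analysis["total"] = totals
--
--     return analysis
-- ===== SOURCE B (Python) =====
-- def build_analysis_by_vehicle_class(detected_classes, turn_types_by_id, crossing_timestamps, crossed_lines_by_id):
--     """Same analysis, built declaratively: each cell is a count over a list of
--     movements instead of a mutable counter structure."""
--     DIRS = ("NORTH", "SOUTH", "EAST", "WEST")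
--     TURNS = ("straight", "left", "right", "u-turn")
--
--     def movement(obj_id):
--         crossings = crossing_timestamps.get(obj_id)
--         if not crossings:
--             return None
--         origin = crossings[0][0]
--         turn = turn_types_by_id.get(obj_id, "straight")
--         if origin in DIRS and turn in TURNS:
--             return (origin, turn)
--         return None
--
--     def table(moves):
--         return {d: {t: moves.count((d, t)) for t in TURNS} for d in DIRS}
--
--     analysis = {}
--     for cls in detected_classes.values():
--         if cls not in analysis:
--             analysis[cls] = table([movement(i) for i, k in detected_classes.items() if k == cls])
--     analysis["total"] = table([movement(i) for i in detected_classes])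
--     return analysis
-- ===== Notes on version B (the rewrite author's own statement) =====
-- stated objective: alternative
-- what changed: Replaces A's mutable nested counter dicts (group-by-class dict, then nested loops incrementing analysis and totals in place) with a declarative build: a movement(obj_id) classifier plus per-cell list.count over the movements of each class (and of all vehicles for the totals).
import Mathlib
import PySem

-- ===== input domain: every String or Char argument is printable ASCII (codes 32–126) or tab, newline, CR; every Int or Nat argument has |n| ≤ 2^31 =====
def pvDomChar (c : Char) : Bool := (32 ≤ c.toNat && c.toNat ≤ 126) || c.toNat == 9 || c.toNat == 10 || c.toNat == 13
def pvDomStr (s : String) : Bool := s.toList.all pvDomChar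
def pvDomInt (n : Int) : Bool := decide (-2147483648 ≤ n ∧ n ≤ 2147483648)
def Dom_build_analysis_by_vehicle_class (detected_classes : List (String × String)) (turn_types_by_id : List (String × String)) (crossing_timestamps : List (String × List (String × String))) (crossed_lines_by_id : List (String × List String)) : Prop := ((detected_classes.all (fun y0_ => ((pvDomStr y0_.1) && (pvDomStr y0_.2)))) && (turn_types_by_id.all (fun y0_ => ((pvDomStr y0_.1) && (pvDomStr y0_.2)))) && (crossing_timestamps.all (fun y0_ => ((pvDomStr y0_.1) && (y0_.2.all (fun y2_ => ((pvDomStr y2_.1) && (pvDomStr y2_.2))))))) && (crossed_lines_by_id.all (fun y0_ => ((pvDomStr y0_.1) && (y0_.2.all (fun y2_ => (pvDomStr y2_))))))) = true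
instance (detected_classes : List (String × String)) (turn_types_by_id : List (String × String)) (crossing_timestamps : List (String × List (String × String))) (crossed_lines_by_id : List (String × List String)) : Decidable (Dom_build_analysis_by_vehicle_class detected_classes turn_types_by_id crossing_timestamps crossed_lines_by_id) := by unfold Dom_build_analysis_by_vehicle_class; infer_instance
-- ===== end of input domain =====

-- B replaces A's mutable nested counter dicts (group-by-class, then in-place increments)
-- with a declarative build: a movement classifier and per-cell counts over movement lists
-- (objective: alternative; same return value, proved equal below).


-- ===== PORT A =====
-- the zeroed {direction: {turn: 0}} template literal A writes out twice
def pvTmplRow : PySem.Dict String Int :=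
  PySem.Dict.mk [("straight", 0), ("left", 0), ("right", 0), ("u-turn", 0)]
def pvTmpl : PySem.Dict String (PySem.Dict String Int) :=
  PySem.Dict.mk [("NORTH", pvTmplRow), ("SOUTH", pvTmplRow), ("EAST", pvTmplRow), ("WEST", pvTmplRow)]

-- literal port of A; the nested dicts are PySem.Dict, converted to assoc lists at the end
def build_analysis_by_vehicle_class (detected_classes : List (String × String)) (turn_types_by_id : List (String × String)) (crossing_timestamps : List (String × List (String × String))) (crossed_lines_by_id : List (String × List String)) : List (String × List (String × List (String × Int))) :=
  let totals := pvTmpl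
  -- for obj_id, vehicle_class in detected_classes.items(): group
  let vehicles_by_class : PySem.Dict String (List String) :=
    detected_classes.foldl (fun g p =>
      let g := if g.contains p.2 then g else g.insert p.2 []
      g.modify p.2 [] (fun l => l ++ [p.1])) PySem.Dict.empty
  -- for vehicle_class, vehicle_ids in vehicles_by_class.items(): count
  let st :=
    vehicles_by_class.items.foldl (fun (st : PySem.Dict String (PySem.Dict String (PySem.Dict String Int)) × PySem.Dict String (PySem.Dict String Int)) cg =>
      let analysis := st.1.insert cg.1 pvTmpl
      cg.2.foldl (fun st2 vid =>
        match (PySem.Dict.mk crossing_timestamps).get? vid with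
        | none => st2
        | some ts =>
          if ts.isEmpty then st2 else
          let origin := (ts.headD ("", "")).1   -- ts[0][0]; exact, guarded non-empty
          let turn := ((PySem.Dict.mk turn_types_by_id).get? vid).getD "straight"
          match st2.1.get? cg.1 with
          | none => st2   -- unreachable: cg.1 was inserted just above (Python would raise KeyError)
          | some row =>
            if row.contains origin && (row.getD origin PySem.Dict.empty).contains turn then
              (st2.1.modify cg.1 PySem.Dict.empty (fun tb => tb.modify origin PySem.Dict.empty (fun r => r.modify turn 0 (· + 1))),
               st2.2.modify origin PySem.Dict.empty (fun r => r.modify turn 0 (· + 1)))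
            else st2) (analysis, st.2)) (PySem.Dict.empty, totals)
  let analysis := st.1.insert "total" st.2
  analysis.items.map (fun ct => (ct.1, ct.2.items.map (fun dr => (dr.1, dr.2.items))))

-- ===== PORT B =====
def pvDirs : List String := ["NORTH", "SOUTH", "EAST", "WEST"]
def pvTurns : List String := ["straight", "left", "right", "u-turn"]

-- movement(obj_id) from Source B
def pvMovement (turn_types_by_id : List (String × String)) (crossing_timestamps : List (String × List (String × String))) (obj_id : String) : Option (String × String) :=
  match (PySem.Dict.mk crossing_timestamps).get? obj_id with
  | none => none
  | some crossings =>
    if crossings.isEmpty then none else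
    let origin := (crossings.headD ("", "")).1   -- crossings[0][0]; exact, guarded non-empty
    let turn := ((PySem.Dict.mk turn_types_by_id).get? obj_id).getD "straight"
    if pvDirs.contains origin && pvTurns.contains turn then some (origin, turn) else none

-- table(moves) from Source B
def pvTable (moves : List (Option (String × String))) : List (String × List (String × Int)) :=
  pvDirs.map (fun d => (d, pvTurns.map (fun t => (t, (moves.count (some (d, t)) : Int)))))

def build_analysis_by_vehicle_class_alt (detected_classes : List (String × String)) (turn_types_by_id : List (String × String)) (crossing_timestamps : List (String × List (String × String))) (crossed_lines_by_id : List (String × List String)) : List (String × List (String × List (String × Int))) :=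
  let analysis : PySem.Dict String (List (String × List (String × Int))) :=
    detected_classes.foldl (fun a p =>
      if a.contains p.2 then a
      else a.insert p.2 (pvTable ((detected_classes.filter (fun q => q.2 == p.2)).map (fun q => pvMovement turn_types_by_id crossing_timestamps q.1)))) PySem.Dict.empty
  (analysis.insert "total" (pvTable (detected_classes.map (fun q => pvMovement turn_types_by_id crossing_timestamps q.1)))).items

-- ===== PRECONDITION & SPEC =====
def Spec_build_analysis_by_vehicle_class (detected_classes : List (String × String)) (turn_types_by_id : List (String × String)) (crossing_timestamps : List (String × List (String × String))) (crossed_lines_by_id : List (String × List String)) (out : List (String × List (String × List (String × Int)))) : Prop := out = build_analysis_by_vehicle_class_alt detected_classes turn_types_by_id crossing_timestamps crossed_lines_by_id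
instance (detected_classes : List (String × String)) (turn_types_by_id : List (String × String)) (crossing_timestamps : List (String × List (String × String))) (crossed_lines_by_id : List (String × List String)) (out : List (String × List (String × List (String × Int)))) : Decidable (Spec_build_analysis_by_vehicle_class detected_classes turn_types_by_id crossing_timestamps crossed_lines_by_id out) := by unfold Spec_build_analysis_by_vehicle_class; infer_instance

-- ===== CLAIM (what is proved, stated in full; the proofs are below) =====
def Claim_equal_build_analysis_by_vehicle_class : Prop := ∀ (detected_classes : List (String × String)) (turn_types_by_id : List (String × String)) (crossing_timestamps : List (String × List (String × String))) (crossed_lines_by_id : List (String × List String)), Dom_build_analysis_by_vehicle_class detected_classes turn_types_by_id crossing_timestamps crossed_lines_by_id → Spec_build_analysis_by_vehicle_class detected_classes turn_types_by_id crossing_timestamps crossed_lines_by_id (build_analysis_by_vehicle_class detected_classes turn_types_by_id crossing_timestamps crossed_lines_by_id)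

-- ===== LEMMAS AND PROOFS =====

-- a 4×4 table of counters, one field per (direction, turn) cell
structure Tb where
  ns : Int
  nl : Int
  nr : Int
  nu : Int
  ss : Int
  sl : Int
  sr : Int
  su : Int
  es : Int
  el : Int
  er : Int
  eu : Int
  ws : Int
  wl : Int
  wr : Int
  wu : Int
  deriving DecidableEq, Repr

def cntT (ms : List (Option (String × String))) : Tb :=
  ⟨ms.count (some ("NORTH", "straight")), ms.count (some ("NORTH", "left")), ms.count (some ("NORTH", "right")), ms.count (some ("NORTH", "u-turn")),
   ms.count (some ("SOUTH", "straight")), ms.count (some ("SOUTH", "left")), ms.count (some ("SOUTH", "right")), ms.count (some ("SOUTH", "u-turn")),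
   ms.count (some ("EAST", "straight")), ms.count (some ("EAST", "left")), ms.count (some ("EAST", "right")), ms.count (some ("EAST", "u-turn")),
   ms.count (some ("WEST", "straight")), ms.count (some ("WEST", "left")), ms.count (some ("WEST", "right")), ms.count (some ("WEST", "u-turn"))⟩

def addT (x y : Tb) : Tb :=
  ⟨x.ns + y.ns, x.nl + y.nl, x.nr + y.nr, x.nu + y.nu,
   x.ss + y.ss, x.sl + y.sl, x.sr + y.sr, x.su + y.su,
   x.es + y.es, x.el + y.el, x.er + y.er, x.eu + y.eu,
   x.ws + y.ws, x.wl + y.wl, x.wr + y.wr, x.wu + y.wu⟩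

def bumpT (x : Tb) (d t : String) : Tb :=
  if d = "NORTH" then
    (if t = "straight" then { x with ns := x.ns + 1 } else if t = "left" then { x with nl := x.nl + 1 } else if t = "right" then { x with nr := x.nr + 1 } else if t = "u-turn" then { x with nu := x.nu + 1 } else x)
  else if d = "SOUTH" then
    (if t = "straight" then { x with ss := x.ss + 1 } else if t = "left" then { x with sl := x.sl + 1 } else if t = "right" then { x with sr := x.sr + 1 } else if t = "u-turn" then { x with su := x.su + 1 } else x)
  else if d = "EAST" then
    (if t = "straight" then { x with es := x.es + 1 } else if t = "left" then { x with el := x.el + 1 } else if t = "right" then { x with er := x.er + 1 } else if t = "u-turn" then { x with eu := x.eu + 1 } else x)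
  else if d = "WEST" then
    (if t = "straight" then { x with ws := x.ws + 1 } else if t = "left" then { x with wl := x.wl + 1 } else if t = "right" then { x with wr := x.wr + 1 } else if t = "u-turn" then { x with wu := x.wu + 1 } else x)
  else x

def zeroT : Tb := ⟨0,0,0,0,0,0,0,0,0,0,0,0,0,0,0,0⟩

def tblL (x : Tb) : List (String × List (String × Int)) :=
  [("NORTH", [("straight", x.ns), ("left", x.nl), ("right", x.nr), ("u-turn", x.nu)]),
   ("SOUTH", [("straight", x.ss), ("left", x.sl), ("right", x.sr), ("u-turn", x.su)]),
   ("EAST",  [("straight", x.es), ("left", x.el), ("right", x.er), ("u-turn", x.eu)]),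
   ("WEST",  [("straight", x.ws), ("left", x.wl), ("right", x.wr), ("u-turn", x.wu)])]

def tblD (x : Tb) : PySem.Dict String (PySem.Dict String Int) :=
  PySem.Dict.mk [("NORTH", PySem.Dict.mk [("straight", x.ns), ("left", x.nl), ("right", x.nr), ("u-turn", x.nu)]),
                 ("SOUTH", PySem.Dict.mk [("straight", x.ss), ("left", x.sl), ("right", x.sr), ("u-turn", x.su)]),
                 ("EAST",  PySem.Dict.mk [("straight", x.es), ("left", x.el), ("right", x.er), ("u-turn", x.eu)]),
                 ("WEST",  PySem.Dict.mk [("straight", x.ws), ("left", x.wl), ("right", x.wr), ("u-turn", x.wu)])]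

-- the inner-loop step of port A, named for the proofs (definitionally the lambda in the port)
def pvStepA (turn_types_by_id : List (String × String)) (crossing_timestamps : List (String × List (String × String))) (c : String)
    (st2 : PySem.Dict String (PySem.Dict String (PySem.Dict String Int)) × PySem.Dict String (PySem.Dict String Int)) (vid : String) :
    PySem.Dict String (PySem.Dict String (PySem.Dict String Int)) × PySem.Dict String (PySem.Dict String Int) :=
  match (PySem.Dict.mk crossing_timestamps).get? vid with
  | none => st2
  | some ts =>
    if ts.isEmpty then st2 else
    let origin := (ts.headD ("", "")).1
    let turn := ((PySem.Dict.mk turn_types_by_id).get? vid).getD "straight"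
    match st2.1.get? c with
    | none => st2
    | some row =>
      if row.contains origin && (row.getD origin PySem.Dict.empty).contains turn then
        (st2.1.modify c PySem.Dict.empty (fun tb => tb.modify origin PySem.Dict.empty (fun r => r.modify turn 0 (· + 1))),
         st2.2.modify origin PySem.Dict.empty (fun r => r.modify turn 0 (· + 1)))
      else st2

def pvConv (tb : PySem.Dict String (PySem.Dict String Int)) : List (String × List (String × Int)) :=
  tb.items.map (fun dr => (dr.1, dr.2.items))

def pvCls (l : List (String × String)) : List String := PySem.Set.ofList (l.map Prod.snd)

def pvIds (l : List (String × String)) (c : String) : List String :=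
  (l.filter (fun q => q.2 == c)).map Prod.fst

def pvMovesCls (tt : List (String × String)) (ct : List (String × List (String × String)))
    (l : List (String × String)) (c : String) : List (Option (String × String)) :=
  (l.filter (fun q => q.2 == c)).map (fun q => pvMovement tt ct q.1)

def pvMovesAll (tt : List (String × String)) (ct : List (String × List (String × String)))
    (l : List (String × String)) : List (Option (String × String)) :=
  l.map (fun q => pvMovement tt ct q.1)

lemma tblD_conv (x : Tb) : pvConv (tblD x) = tblL x := rfl

lemma pvTmpl_eq : pvTmpl = tblD zeroT := rfl

lemma pvTable_eq (ms : List (Option (String × String))) : pvTable ms = tblL (cntT ms) := rfl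

lemma addT_zero (x : Tb) : addT x (cntT []) = x := by cases x; simp [addT, cntT]

lemma zero_addT (x : Tb) : addT zeroT x = x := by cases x; simp [addT, zeroT]

lemma addT_assoc (x y z : Tb) : addT (addT x y) z = addT x (addT y z) := by
  cases x; cases y; cases z; simp [addT]; omega

lemma cntT_append (ms ms' : List (Option (String × String))) :
    cntT (ms ++ ms') = addT (cntT ms) (cntT ms') := by
  simp [cntT, addT, List.count_append]

lemma cntT_perm {ms ms' : List (Option (String × String))} (h : ms.Perm ms') : cntT ms = cntT ms' := by
  simp [cntT, h.count_eq]

lemma cntT_cons_none (ms : List (Option (String × String))) : cntT (none :: ms) = cntT ms := by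
  simp [cntT]

lemma tblD_check (x : Tb) (d t : String) :
    ((tblD x).contains d && ((tblD x).getD d PySem.Dict.empty).contains t) = (pvDirs.contains d && pvTurns.contains t) := by
  rw [Bool.eq_iff_iff]
  have hD : d = "NORTH" ∨ d = "SOUTH" ∨ d = "EAST" ∨ d = "WEST" ∨ ¬(d = "NORTH" ∨ d = "SOUTH" ∨ d = "EAST" ∨ d = "WEST") := by tauto
  rcases hD with rfl|rfl|rfl|rfl|hD
  · simp [tblD, pvDirs, pvTurns, PySem.Dict.contains, PySem.Dict.getD, PySem.Dict.get?, PySem.Dict.empty]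
    exact or_congr eq_comm (or_congr eq_comm (or_congr eq_comm eq_comm))
  · simp [tblD, pvDirs, pvTurns, PySem.Dict.contains, PySem.Dict.getD, PySem.Dict.get?, PySem.Dict.empty]
    exact or_congr eq_comm (or_congr eq_comm (or_congr eq_comm eq_comm))
  · simp [tblD, pvDirs, pvTurns, PySem.Dict.contains, PySem.Dict.getD, PySem.Dict.get?, PySem.Dict.empty]
    exact or_congr eq_comm (or_congr eq_comm (or_congr eq_comm eq_comm))
  · simp [tblD, pvDirs, pvTurns, PySem.Dict.contains, PySem.Dict.getD, PySem.Dict.get?, PySem.Dict.empty]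
    exact or_congr eq_comm (or_congr eq_comm (or_congr eq_comm eq_comm))
  · push_neg at hD
    obtain ⟨h1, h2, h3, h4⟩ := hD
    simp [tblD, pvDirs, pvTurns, PySem.Dict.contains, PySem.Dict.getD, PySem.Dict.get?, PySem.Dict.empty,
          h1, h2, h3, h4, Ne.symm h1, Ne.symm h2, Ne.symm h3, Ne.symm h4]

lemma tblD_bump (x : Tb) (d t : String) (hd : pvDirs.contains d) (ht : pvTurns.contains t) :
    (tblD x).modify d PySem.Dict.empty (fun r => r.modify t 0 (· + 1)) = tblD (bumpT x d t) := by
  simp [pvDirs, List.contains_eq_mem] at hd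
  simp [pvTurns, List.contains_eq_mem] at ht
  rcases hd with rfl|rfl|rfl|rfl <;> rcases ht with rfl|rfl|rfl|rfl <;>
    simp [tblD, bumpT, PySem.Dict.modify, PySem.Dict.insert, PySem.Dict.getD, PySem.Dict.get?, PySem.Dict.contains, PySem.Dict.empty]

lemma cntT_cons_some (ms : List (Option (String × String))) (d t : String)
    (hd : pvDirs.contains d) (ht : pvTurns.contains t) (x : Tb) :
    addT (bumpT x d t) (cntT ms) = addT x (cntT (some (d, t) :: ms)) := by
  simp [pvDirs, List.contains_eq_mem] at hd
  simp [pvTurns, List.contains_eq_mem] at ht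
  rcases hd with rfl|rfl|rfl|rfl <;> rcases ht with rfl|rfl|rfl|rfl <;>
    simp [bumpT, addT, cntT] <;> omega

lemma pvMovement_some {tt : List (String × String)} {ct : List (String × List (String × String))} {vid d t : String}
    (h : pvMovement tt ct vid = some (d, t)) : pvDirs.contains d ∧ pvTurns.contains t := by
  unfold pvMovement at h
  split at h <;> simp_all [List.contains_eq_mem]
  obtain ⟨-, ⟨h1, h2⟩, rfl, rfl⟩ := h
  exact ⟨h1, h2⟩

lemma modify_insert_self {ν : Type} (a : PySem.Dict String ν) (c : String) (v : ν) (d0 : ν) (f : ν → ν) :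
    (a.insert c v).modify c d0 f = a.insert c (f v) := by
  simp [PySem.Dict.modify, PySem.Dict.getD_insert_self, PySem.Dict.insert_insert_self]

lemma stepA_char (tt : List (String × String)) (ct : List (String × List (String × String))) (c : String)
    (a : PySem.Dict String (PySem.Dict String (PySem.Dict String Int))) (x u : Tb) (vid : String) :
    pvStepA tt ct c (a.insert c (tblD x), tblD u) vid =
      match pvMovement tt ct vid with
      | some (d, t) => (a.insert c (tblD (bumpT x d t)), tblD (bumpT u d t))
      | none => (a.insert c (tblD x), tblD u) := by
  unfold pvStepA pvMovement
  rcases hG : (PySem.Dict.mk ct).get? vid with _ | ts <;> simp only [hG]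
  by_cases he : ts.isEmpty = true
  · simp only [he, if_true]
  · have he0 : ts.isEmpty = false := Bool.eq_false_iff.mpr he
    simp only [he0, Bool.false_eq_true, if_false, PySem.Dict.get?_insert_self]
    rw [tblD_check]
    by_cases hv : (pvDirs.contains (ts.headD ("", "")).1 && pvTurns.contains (((PySem.Dict.mk tt).get? vid).getD "straight")) = true
    · have hd2 : pvDirs.contains (ts.headD ("", "")).1 = true := (Bool.and_eq_true_iff.mp hv).1
      have ht2 : pvTurns.contains (((PySem.Dict.mk tt).get? vid).getD "straight") = true := (Bool.and_eq_true_iff.mp hv).2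
      simp only [if_pos hv, modify_insert_self, tblD_bump _ _ _ hd2 ht2]
    · simp only [if_neg hv]

lemma inner_fold (tt : List (String × String)) (ct : List (String × List (String × String))) (c : String)
    (ids : List String) : ∀ (a : PySem.Dict String (PySem.Dict String (PySem.Dict String Int))) (x u : Tb),
    ids.foldl (pvStepA tt ct c) (a.insert c (tblD x), tblD u) =
      (a.insert c (tblD (addT x (cntT (ids.map (pvMovement tt ct))))),
       tblD (addT u (cntT (ids.map (pvMovement tt ct))))) := by
  induction ids with
  | nil => intro a x u; simp [addT_zero]
  | cons id rest ih =>
    intro a x u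
    rw [List.foldl_cons, stepA_char]
    rcases hm : pvMovement tt ct id with _ | ⟨d, t⟩
    · rw [ih a x u, List.map_cons, hm, cntT_cons_none]
    · obtain ⟨hd, ht⟩ := pvMovement_some hm
      rw [ih a (bumpT x d t) (bumpT u d t), List.map_cons, hm,
          cntT_cons_some _ _ _ hd ht, cntT_cons_some _ _ _ hd ht]

lemma outer_fold (tt : List (String × String)) (ct : List (String × List (String × String)))
    (gl : List (String × List String)) :
    ∀ (a : PySem.Dict String (PySem.Dict String (PySem.Dict String Int))) (u : Tb),
    gl.foldl (fun st cg => cg.2.foldl (pvStepA tt ct cg.1) (st.1.insert cg.1 pvTmpl, st.2)) (a, tblD u) =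
      (gl.foldl (fun a cg => a.insert cg.1 (tblD (cntT (cg.2.map (pvMovement tt ct))))) a,
       tblD (addT u (cntT ((gl.flatMap (fun cg => cg.2)).map (pvMovement tt ct))))) := by
  induction gl with
  | nil => intro a u; simp [addT_zero]
  | cons cg rest ih =>
    intro a u
    rw [List.foldl_cons]
    have h1 : cg.2.foldl (pvStepA tt ct cg.1) ((a, tblD u).1.insert cg.1 pvTmpl, (a, tblD u).2) =
        (a.insert cg.1 (tblD (cntT (cg.2.map (pvMovement tt ct)))), tblD (addT u (cntT (cg.2.map (pvMovement tt ct))))) := by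
      rw [pvTmpl_eq, inner_fold tt ct cg.1 cg.2 a zeroT u, zero_addT]
    rw [h1, ih, List.foldl_cons, List.flatMap_cons, List.map_append, cntT_append, addT_assoc]

lemma groups_items (l : List (String × String)) :
    (l.foldl (fun g p =>
      let g := if g.contains p.2 then g else g.insert p.2 []
      g.modify p.2 [] (fun lst => lst ++ [p.1])) (PySem.Dict.empty : PySem.Dict String (List String))).items =
    (pvCls l).map (fun c => (c, pvIds l c)) := by
  have hstep : (fun (g : PySem.Dict String (List String)) (p : String × String) =>
      let g' := if g.contains p.2 then g else g.insert p.2 []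
      g'.modify p.2 [] (fun lst => lst ++ [p.1])) = fun g p => g.modify p.2 [] (fun lst => lst ++ [p.1]) := by
    funext g p
    by_cases h : g.contains p.2 = true
    · simp [h]
    · have h0 : g.contains p.2 = false := Bool.eq_false_iff.mpr h
      simp [h0, PySem.Dict.modify, PySem.Dict.getD_insert_self, PySem.Dict.insert_insert_self,
            PySem.Dict.getD_of_not_contains _ _ h0]
  rw [show (fun (g : PySem.Dict String (List String)) (p : String × String) =>
      let g' := if g.contains p.2 then g else g.insert p.2 []
      g'.modify p.2 [] (fun lst => lst ++ [p.1])) = fun g p => g.modify p.2 [] (fun lst => lst ++ [p.1]) from hstep]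
  have hkeys : (l.foldl (fun g p => g.modify p.2 [] (fun lst => lst ++ [p.1])) (PySem.Dict.empty : PySem.Dict String (List String))).keys
      = PySem.Set.ofList (l.map Prod.snd) := by
    rw [PySem.Dict.keys_foldl_modify_key l Prod.snd [] (fun d x v => v ++ [x.1])]
    simp [PySem.Dict.keys_empty, PySem.Set.update_nil_left]
  have hnd : (PySem.Set.ofList (l.map Prod.snd)).Nodup := PySem.Set.nodup_ofList _
  have hgetD : ∀ c, (l.foldl (fun g p => g.modify p.2 [] (fun lst => lst ++ [p.1])) (PySem.Dict.empty : PySem.Dict String (List String))).getD c []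
      = (l.filter (fun q => q.2 == c)).map Prod.fst := by
    intro c
    rw [show (l.foldl (fun g p => g.modify p.2 [] (fun lst => lst ++ [p.1])) (PySem.Dict.empty : PySem.Dict String (List String)))
        = ((l.map Prod.swap).foldl (fun g p => g.modify p.1 [] (fun lst => lst ++ [p.2])) PySem.Dict.empty) from by rw [List.foldl_map]; rfl]
    rw [PySem.Dict.getD_foldl_modify_append]
    simp [List.filter_map, List.map_map, PySem.Dict.getD_empty]
    rfl
  rw [PySem.Dict.items_eq_map_keys _ (by rw [hkeys]; exact hnd) []]
  rw [hkeys]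
  refine List.map_congr_left fun c _hc => ?_
  rw [hgetD c]
  rfl

lemma bfold_aux (F : String → List (String × List (String × Int))) :
    ∀ (lst : List (String × String)) (acc : PySem.Dict String (List (String × List (String × Int)))) (S : List String),
    acc.keys = S → S.Nodup → acc.items = S.map (fun c => (c, F c)) →
    (lst.foldl (fun a p => if a.contains p.2 then a else a.insert p.2 (F p.2)) acc).items =
      (PySem.Set.update S (lst.map Prod.snd)).map (fun c => (c, F c)) := by
  intro lst
  induction lst with
  | nil => intro acc S hk hnd hi; simpa [PySem.Set.update_nil] using hi
  | cons p rest ih =>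
    intro acc S hk hnd hi
    rw [List.foldl_cons, List.map_cons, PySem.Set.update_cons]
    by_cases h : acc.contains p.2 = true
    · have hm : p.2 ∈ S := by rw [← hk]; exact (PySem.Dict.contains_iff_mem_keys _ _).mp h
      rw [if_pos h, PySem.Set.add_of_mem hm]
      exact ih acc S hk hnd hi
    · have h0 : acc.contains p.2 = false := Bool.eq_false_iff.mpr h
      have hm : p.2 ∉ S := by rw [← hk]; intro hmem; exact h ((PySem.Dict.contains_iff_mem_keys _ _).mpr hmem)
      rw [if_neg h, PySem.Set.add_of_not_mem hm]
      refine ih _ (S ++ [p.2]) ?_ ?_ ?_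
      · rw [PySem.Dict.keys_insert_of_not_contains _ _ h0, hk]
      · simp only [List.nodup_append, List.nodup_cons, List.nodup_nil, and_true]
        refine ⟨hnd, by simp, fun a ha b hb => ?_⟩
        simp only [List.mem_singleton] at hb
        subst hb
        exact fun e => hm (e ▸ ha)
      · rw [PySem.Dict.items_insert_of_not_contains _ _ h0, hi, List.map_append]; rfl

lemma bfold_items (l : List (String × String)) (F : String → List (String × List (String × Int))) :
    (l.foldl (fun a p => if a.contains p.2 then a else a.insert p.2 (F p.2)) (PySem.Dict.empty : PySem.Dict String (List (String × List (String × Int))))).items =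
    (pvCls l).map (fun c => (c, F c)) := by
  rw [bfold_aux F l PySem.Dict.empty [] (PySem.Dict.keys_empty) (List.nodup_nil) rfl]
  rw [PySem.Set.update_nil_left]
  rfl

lemma sum_ite_count (a : String) (N : Nat) :
    ∀ (L : List String), L.Nodup → (L.map (fun c => if a = c then N else 0)).sum = if a ∈ L then N else 0 := by
  intro L
  induction L with
  | nil => simp
  | cons c rest ih =>
    intro hnd
    rw [List.map_cons, List.sum_cons, ih hnd.of_cons]
    by_cases h : a = c
    · subst h
      have hnm := (List.nodup_cons.mp hnd).1
      simp [hnm]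
    · simp [h, List.mem_cons]

lemma classes_flat_perm (l : List (String × String)) :
    ((PySem.Set.ofList (l.map Prod.snd)).flatMap (fun c => l.filter (fun q => q.2 == c))).Perm l := by
  rw [List.perm_iff_count]
  intro x
  rw [List.count_flatMap]
  have h1 : (PySem.Set.ofList (l.map Prod.snd)).map (List.count x ∘ fun c => l.filter (fun q => q.2 == c))
      = (PySem.Set.ofList (l.map Prod.snd)).map (fun c => if x.2 = c then l.count x else 0) := by
    refine List.map_congr_left fun c hc => ?_
    by_cases h : x.2 = c
    · subst h
      simp only [Function.comp_apply]
      have hpx : ((fun q : String × String => q.2 == x.2) x) = true := by simp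
      have hcf := List.count_filter (p := fun q : String × String => q.2 == x.2) (a := x) (l := l) hpx
      simpa using hcf
    · simp only [Function.comp_apply]
      have hz : List.count x (l.filter (fun q => q.2 == c)) = 0 :=
        List.count_eq_zero.mpr (fun hmem => h (by simpa using (List.mem_filter.mp hmem).2))
      rw [hz, if_neg h]
  rw [h1, sum_ite_count x.2 (l.count x) _ (PySem.Set.nodup_ofList _)]
  by_cases hm : x.2 ∈ PySem.Set.ofList (l.map Prod.snd)
  · simp [hm]
  · have hx : x ∉ l := fun hx => hm ((PySem.Set.mem_ofList _ _).mpr (List.mem_map_of_mem hx))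
    simp [hm, List.count_eq_zero.mpr hx]

lemma insert_items_map {ν μ : Type} (X : PySem.Dict String ν) (Y : PySem.Dict String μ) (g : ν → μ)
    (h : Y.items = X.items.map (fun p => (p.1, g p.2))) (k : String) (v : ν) :
    (Y.insert k (g v)).items = (X.insert k v).items.map (fun p => (p.1, g p.2)) := by
  have hc : Y.contains k = X.contains k := by
    simp only [PySem.Dict.contains, h, List.any_map]
    rfl
  unfold PySem.Dict.insert
  rw [hc]
  by_cases hx : X.contains k = true
  · simp only [hx, if_true, h, List.map_map]
    refine List.map_congr_left fun p hp => ?_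
    by_cases hpk : p.1 = k <;> simp [hpk]
  · simp only [hx, Bool.false_eq_true, if_false, h, List.map_append]
    rfl

-- ===== VERDICT (by name: the statement is the Claim_ definition above) =====
theorem build_analysis_by_vehicle_class_spec : Claim_equal_build_analysis_by_vehicle_class := by
  intro dc tt ct cl _hdom
  unfold Spec_build_analysis_by_vehicle_class
  have hA : build_analysis_by_vehicle_class dc tt ct cl =
      ((((dc.foldl (fun g p =>
        let g := if g.contains p.2 then g else g.insert p.2 []
        g.modify p.2 [] (fun lst => lst ++ [p.1])) (PySem.Dict.empty : PySem.Dict String (List String))).items.foldl (fun st cg => cg.2.foldl (pvStepA tt ct cg.1) (st.1.insert cg.1 pvTmpl, st.2)) ((PySem.Dict.empty : PySem.Dict String (PySem.Dict String (PySem.Dict String Int))), tblD zeroT)).1.insert "total" ((dc.foldl (fun g p =>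
        let g := if g.contains p.2 then g else g.insert p.2 []
        g.modify p.2 [] (fun lst => lst ++ [p.1])) (PySem.Dict.empty : PySem.Dict String (List String))).items.foldl (fun st cg => cg.2.foldl (pvStepA tt ct cg.1) (st.1.insert cg.1 pvTmpl, st.2)) ((PySem.Dict.empty : PySem.Dict String (PySem.Dict String (PySem.Dict String Int))), tblD zeroT)).2).items.map (fun p => (p.1, pvConv p.2))) := rfl
  have hB : build_analysis_by_vehicle_class_alt dc tt ct cl =
      (((dc.foldl (fun a p => if a.contains p.2 then a else a.insert p.2 ((fun c => pvTable (pvMovesCls tt ct dc c)) p.2)) (PySem.Dict.empty : PySem.Dict String (List (String × List (String × Int))))).insert "total" (pvTable (pvMovesAll tt ct dc))).items) := rfl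
  have hBitems : (dc.foldl (fun a p => if a.contains p.2 then a else a.insert p.2 ((fun c => pvTable (pvMovesCls tt ct dc c)) p.2)) (PySem.Dict.empty : PySem.Dict String (List (String × List (String × Int))))).items = (pvCls dc).map (fun c => (c, pvTable (pvMovesCls tt ct dc c))) :=
    bfold_items dc (fun c => pvTable (pvMovesCls tt ct dc c))
  have hX : (((pvCls dc).map (fun c => (c, pvIds dc c))).foldl (fun a cg => a.insert cg.1 (tblD (cntT (cg.2.map (pvMovement tt ct))))) (PySem.Dict.empty : PySem.Dict String (PySem.Dict String (PySem.Dict String Int)))).items = ((pvCls dc).map (fun c => (c, pvIds dc c))).map (fun cg => (cg.1, tblD (cntT (cg.2.map (pvMovement tt ct))))) := by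
    have h1 := PySem.Dict.items_foldl_insert_fresh ((pvCls dc).map (fun c => (c, pvIds dc c))) Prod.fst
      (fun cg => tblD (cntT (cg.2.map (pvMovement tt ct)))) (PySem.Dict.empty : PySem.Dict String (PySem.Dict String (PySem.Dict String Int)))
      (fun a _ => PySem.Dict.contains_empty _)
      (by
        rw [List.map_map]
        have hid : (Prod.fst ∘ fun c => (c, pvIds dc c)) = id := rfl
        rw [hid, List.map_id]
        exact PySem.Set.nodup_ofList _)
    simpa using h1
  have hmapped : (pvCls dc).map (fun c => (c, pvTable (pvMovesCls tt ct dc c)))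
      = (((pvCls dc).map (fun c => (c, pvIds dc c))).map (fun cg => (cg.1, tblD (cntT (cg.2.map (pvMovement tt ct)))))).map (fun p => (p.1, pvConv p.2)) := by
    simp only [List.map_map]
    refine List.map_congr_left fun c _hc => ?_
    simp [Function.comp, pvTable_eq, pvIds, pvMovesCls, List.map_map, tblD_conv]
    rfl
  have hY : (dc.foldl (fun a p => if a.contains p.2 then a else a.insert p.2 ((fun c => pvTable (pvMovesCls tt ct dc c)) p.2)) (PySem.Dict.empty : PySem.Dict String (List (String × List (String × Int))))).items = (((pvCls dc).map (fun c => (c, pvIds dc c))).foldl (fun a cg => a.insert cg.1 (tblD (cntT (cg.2.map (pvMovement tt ct))))) (PySem.Dict.empty : PySem.Dict String (PySem.Dict String (PySem.Dict String Int)))).items.map (fun p => (p.1, pvConv p.2)) :=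
    hBitems.trans (hmapped.trans (congrArg (fun L => L.map (fun p => (p.1, pvConv p.2))) hX.symm))
  have htot : pvConv (tblD (cntT ((((pvCls dc).map (fun c => (c, pvIds dc c))).flatMap (fun cg => cg.2)).map (pvMovement tt ct)))) = pvTable (pvMovesAll tt ct dc) := by
    rw [pvTable_eq, tblD_conv]
    have h0 : (((pvCls dc).map (fun c => (c, pvIds dc c))).flatMap (fun cg => cg.2))
        = ((PySem.Set.ofList (dc.map Prod.snd)).flatMap (fun c => dc.filter (fun q => q.2 == c))).map Prod.fst := by
      simp [List.flatMap_map, List.map_flatMap, pvIds, pvCls, Function.comp]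
    have hperm : ((((pvCls dc).map (fun c => (c, pvIds dc c))).flatMap (fun cg => cg.2)).map (pvMovement tt ct)).Perm (pvMovesAll tt ct dc) := by
      rw [h0, List.map_map]
      exact (classes_flat_perm dc).map (pvMovement tt ct ∘ Prod.fst)
    exact congrArg tblL (cntT_perm hperm)
  rw [hA, groups_items, outer_fold]
  dsimp only
  rw [zero_addT, hB, ← htot, insert_items_map _ _ pvConv hY "total" (tblD (cntT ((((pvCls dc).map (fun c => (c, pvIds dc c))).flatMap (fun cg => cg.2)).map (pvMovement tt ct))))]
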